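-- pv_equiv track=rewrite | github.com/david-cattermole/mayaMatchMoveSolver | tests/test/test_solver/test_print_statistics.py | _parse_usage_list
-- ===== SOURCE A (Python) =====
-- def _parse_usage_list(key, input_results):
--     split_char = '#'
--     results_list = [x for x in input_results if x.startswith(key)]
--     results_list = [x.partition(key)[-1] for x in results_list]
--     results_list = split_char.join(results_list)
--     results_list = results_list.split(split_char)
--     results_list = [x for x in results_list if len(x) > 0]
--     return results_list
-- ===== SOURCE B (Python) =====
-- def _parse_usage_list(key, input_results):
--     # Character-level tokenizer: no split/join/partition calls at all.
--     out = []
--     k = len(key)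
--     for x in input_results:
--         if x[:k] == key:
--             cur = []
--             for ch in x[k:]:
--                 if ch == '#':
--                     if cur:
--                         out.append(''.join(cur))
--                     cur = []
--                 else:
--                     cur.append(ch)
--             if cur:
--                 out.append(''.join(cur))
--     return out
-- ===== Notes on version B (the rewrite author's own statement) =====
-- stated objective: alternative
-- what changed: Replaces A's string-library pipeline (filter, partition, join on '#', split on '#', filter-empty) with a hand-written character-level state machine: one pass over the characters of each prefix-matching element, accumulating the current token and flushing it on '#' or at end of string, never calling split/join/partition at all.
-- crash fix: When key is the empty string and input_results is nonempty, A raises ValueError ('empty separator' from str.partition); B returns the list of nonempty '#'-separated tokens of every element. — e.g. on _parse_usage_list("", ["a#b", ""]): A raises ValueError, B returns ["a", "b"]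
import Mathlib
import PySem

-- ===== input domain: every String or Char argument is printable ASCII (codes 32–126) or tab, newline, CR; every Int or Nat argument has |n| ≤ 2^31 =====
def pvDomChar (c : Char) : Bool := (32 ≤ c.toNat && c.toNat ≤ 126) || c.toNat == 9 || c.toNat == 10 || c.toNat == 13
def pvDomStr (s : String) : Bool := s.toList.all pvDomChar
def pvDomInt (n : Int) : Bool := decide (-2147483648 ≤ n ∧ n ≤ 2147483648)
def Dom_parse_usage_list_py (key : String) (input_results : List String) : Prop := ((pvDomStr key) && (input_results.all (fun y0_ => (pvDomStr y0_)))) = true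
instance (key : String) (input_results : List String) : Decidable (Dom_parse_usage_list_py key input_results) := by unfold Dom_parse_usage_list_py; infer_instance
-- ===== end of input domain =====

-- B replaces A's split/join/partition pipeline by a hand-written character-level tokenizer
-- (flush the current token on '#' or end of string); objective: alternative, same cost.

-- ===== PORT A =====
-- hand port of x.partition(key)[-1] (the part after the FIRST occurrence of key, "" if absent);
-- exact for key ≠ "" — Python raises ValueError for an empty separator, which Pre_ excludes.
def pvPartitionAfter (x key : String) : String :=
  let i := PySem.Str.find x key
  if i = -1 then "" else PySem.Str.slice x (some (i + PySem.Str.len key)) none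

def parse_usage_list_py (key : String) (input_results : List String) : List String :=
  let split_char := "#"
  let r1 := input_results.filter (fun x => PySem.Str.startswith x key)
  let r2 := r1.map (fun x => pvPartitionAfter x key)
  let r3 := PySem.Str.join split_char r2
  let r4 := (PySem.Str.split? r3 split_char).getD []
  r4.filter (fun x => decide (0 < PySem.Str.len x))

-- ===== PORT B =====
-- the inner loop of Source B: state = (out, cur); '#' flushes cur (if nonempty) into out
def pvTokStep (s : List String × List Char) (ch : Char) : List String × List Char :=
  if ch = '#' then (if s.2 ≠ [] then s.1 ++ [String.ofList s.2] else s.1, [])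
  else (s.1, s.2 ++ [ch])

-- the final 'if cur: out.append(...)' of Source B
def pvFlush (s : List String × List Char) : List String :=
  if s.2 ≠ [] then s.1 ++ [String.ofList s.2] else s.1

def parse_usage_list_py_alt (key : String) (input_results : List String) : List String :=
  let k := PySem.Str.len key
  input_results.foldl (fun out x =>
    if PySem.Str.slice x none (some k) == key then
      pvFlush ((PySem.Str.slice x (some k) none).toList.foldl pvTokStep (out, []))
    else out) []

-- ===== PRECONDITION & SPEC =====
-- Pre_ excludes exactly the inputs on which Python A raises: key = '' with a nonempty list
-- (str.partition('') raises ValueError on every element, and every element startswith('')).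
def Pre_parse_usage_list_py (key : String) (input_results : List String) : Prop :=
  key ≠ "" ∨ input_results = []
instance (key : String) (input_results : List String) : Decidable (Pre_parse_usage_list_py key input_results) := by unfold Pre_parse_usage_list_py; infer_instance

def pvWitness_parse_usage_list_py : String × List String := ("k", ["kab#c", "zz"])

-- When key is the empty string and input_results is nonempty, A raises ValueError (empty
-- separator in str.partition); B returns the nonempty '#'-separated tokens of every element.
def Raises_parse_usage_list_py (key : String) (input_results : List String) : Prop :=
  key = "" ∧ input_results ≠ []
instance (key : String) (input_results : List String) : Decidable (Raises_parse_usage_list_py key input_results) := by unfold Raises_parse_usage_list_py; infer_instance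
def pvRaiseWitness_parse_usage_list_py : String × List String := ("", ["a#b", ""])
def pvRaiseWitnessOut_parse_usage_list_py : List String := ["a", "b"]

def Spec_parse_usage_list_py (key : String) (input_results : List String) (out : List String) : Prop := out = parse_usage_list_py_alt key input_results
instance (key : String) (input_results : List String) (out : List String) : Decidable (Spec_parse_usage_list_py key input_results out) := by unfold Spec_parse_usage_list_py; infer_instance

-- ===== CLAIM (what is proved, stated in full; the proofs are below) =====
def Claim_equal_parse_usage_list_py : Prop := ∀ (key : String) (input_results : List String), Dom_parse_usage_list_py key input_results → Pre_parse_usage_list_py key input_results → Spec_parse_usage_list_py key input_results (parse_usage_list_py key input_results)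
def Claim_raises_parse_usage_list_py : Prop := (∀ (key : String) (input_results : List String), Dom_parse_usage_list_py key input_results → Raises_parse_usage_list_py key input_results → ¬ Pre_parse_usage_list_py key input_results) ∧ (Dom_parse_usage_list_py (pvRaiseWitness_parse_usage_list_py.1) (pvRaiseWitness_parse_usage_list_py.2) ∧ Raises_parse_usage_list_py (pvRaiseWitness_parse_usage_list_py.1) (pvRaiseWitness_parse_usage_list_py.2) ∧ parse_usage_list_py_alt (pvRaiseWitness_parse_usage_list_py.1) (pvRaiseWitness_parse_usage_list_py.2) = pvRaiseWitnessOut_parse_usage_list_py)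

-- ===== LEMMAS AND PROOFS =====

-- splitting a char list on '#', specified structurally
def pvCsplit : List Char → List (List Char)
  | [] => [[]]
  | c :: r => if c = '#' then [] :: pvCsplit r else (pvCsplit r).modifyHead (c :: ·)

theorem pvCsplit_ne_nil (cs : List Char) : pvCsplit cs ≠ [] := by
  cases cs with
  | nil => simp [pvCsplit]
  | cons c r =>
    simp only [pvCsplit]
    split
    · simp
    · cases h : pvCsplit r with
      | nil => exact absurd h (pvCsplit_ne_nil r)
      | cons a t => simp

theorem pv_go_eq (fuel : Nat) (l cur : List Char) (acc : List (List Char))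
    (h : l.length < fuel) :
    PySem.Chars.splitOn.go ['#'] fuel l cur acc
      = acc.reverse ++ (pvCsplit l).modifyHead (cur.reverse ++ ·) := by
  induction fuel generalizing l cur acc with
  | zero => omega
  | succ n ih =>
    cases l with
    | nil =>
      rw [PySem.Chars.splitOn.go]
      simp [pvCsplit]
      omega
    | cons c rest =>
      rw [PySem.Chars.splitOn.go]
      by_cases hc : c = '#'
      · subst hc
        have hp : List.isPrefixOf ['#'] ('#' :: rest) = true := by simp [List.isPrefixOf]
        rw [if_pos hp]
        rw [ih _ _ _ (by simp at h ⊢; omega)]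
        obtain ⟨hd, tl, hcs⟩ : ∃ hd tl, pvCsplit rest = hd :: tl := by
          cases hx : pvCsplit rest with
          | nil => exact absurd hx (pvCsplit_ne_nil rest)
          | cons a t => exact ⟨a, t, rfl⟩
        simp [pvCsplit, hcs]
      · have hp : List.isPrefixOf ['#'] (c :: rest) = false := by
          simp [List.isPrefixOf]; exact fun hh => hc hh.symm
        rw [if_neg (by simp [hp])]
        rw [ih _ _ _ (by simp at h ⊢; omega)]
        obtain ⟨hd, tl, hcs⟩ : ∃ hd tl, pvCsplit rest = hd :: tl := by
          cases hx : pvCsplit rest with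
          | nil => exact absurd hx (pvCsplit_ne_nil rest)
          | cons a t => exact ⟨a, t, rfl⟩
        simp [pvCsplit, hc, hcs]

theorem pv_splitOn_hash (cs : List Char) :
    PySem.Chars.splitOn cs ['#'] = pvCsplit cs := by
  rw [PySem.Chars.splitOn, pv_go_eq _ _ _ _ (by omega)]
  obtain ⟨hd, tl, hcs⟩ : ∃ hd tl, pvCsplit cs = hd :: tl := by
    cases hx : pvCsplit cs with
    | nil => exact absurd hx (pvCsplit_ne_nil cs)
    | cons a t => exact ⟨a, t, rfl⟩
  simp [hcs]

theorem pvCsplit_append (a b : List Char) :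
    pvCsplit (a ++ '#' :: b) = pvCsplit a ++ pvCsplit b := by
  induction a with
  | nil => simp [pvCsplit]
  | cons c a' ih =>
    by_cases hc : c = '#'
    · subst hc
      simp [pvCsplit, ih]
    · obtain ⟨hd, tl, hcs⟩ : ∃ hd tl, pvCsplit a' = hd :: tl := by
        cases hx : pvCsplit a' with
        | nil => exact absurd hx (pvCsplit_ne_nil a')
        | cons x t => exact ⟨x, t, rfl⟩
      simp [pvCsplit, hc, ih, hcs]

theorem pv_flatten (ts : List (List Char)) :
    (pvCsplit (PySem.Chars.join ['#'] ts)).filter (· ≠ [])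
      = ts.flatMap (fun t => (pvCsplit t).filter (· ≠ [])) := by
  induction ts with
  | nil => simp [PySem.Chars.join, List.intercalate, pvCsplit]
  | cons t rest ih =>
    cases rest with
    | nil => simp [PySem.Chars.join, List.intercalate]
    | cons r rs =>
      have hj : PySem.Chars.join ['#'] (t :: r :: rs)
          = t ++ '#' :: PySem.Chars.join ['#'] (r :: rs) := by
        simp [PySem.Chars.join, List.intercalate, List.intersperse]
      rw [hj, pvCsplit_append, List.filter_append, ih]
      simp

theorem pv_after_of_startswith (x key : String) (h : PySem.Str.startswith x key = true) :
    pvPartitionAfter x key = PySem.Str.slice x (some (PySem.Str.len key)) none := by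
  have hpre : key.toList <+: x.toList := by
    rw [PySem.Str.startswith_eq] at h
    exact (PySem.Chars.startswith_iff _ _).mp h
  have hnn : 0 ≤ PySem.Chars.find x.toList key.toList :=
    (PySem.Chars.find_nonneg_iff _ _).mpr hpre.isInfix
  have hspec := PySem.Chars.find_spec hnn
  have hz : (PySem.Chars.find x.toList key.toList).toNat = 0 := by
    by_contra hn
    exact hspec.2 0 (Nat.pos_of_ne_zero hn) (by simpa using hpre)
  have hfind : PySem.Str.find x key = 0 := by
    rw [PySem.Str.find_eq]; omega
  unfold pvPartitionAfter
  rw [hfind]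
  norm_num

-- B's prefix test x[:len(key)] == key is A's x.startswith(key)
theorem pv_prefix_check (x key : String) :
    (PySem.Str.slice x none (some (PySem.Str.len key)) == key) = PySem.Str.startswith x key := by
  rw [PySem.Str.startswith_eq]
  rw [show PySem.Str.len key = (key.toList.length : Int) from PySem.Str.len_eq key]
  have hsl : PySem.Str.slice x none (some (key.toList.length : Int))
      = String.ofList (x.toList.take key.toList.length) := by
    simp [PySem.Str.slice, PySem.List.slice_to_natCast]
  rw [hsl]
  by_cases h : key.toList <+: x.toList
  · rw [(PySem.Chars.startswith_iff x.toList key.toList).mpr h]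
    have ht : x.toList.take key.toList.length = key.toList := (List.prefix_iff_eq_take.mp h).symm
    rw [ht, String.ofList_toList]
    simp
  · have hb : PySem.Chars.startswith x.toList key.toList = false := by
      cases hx : PySem.Chars.startswith x.toList key.toList with
      | false => rfl
      | true => exact absurd ((PySem.Chars.startswith_iff _ _).mp hx) h
    rw [hb]
    rw [beq_eq_false_iff_ne]
    intro he
    apply h
    rw [List.prefix_iff_eq_take]
    have : (String.ofList (x.toList.take key.toList.length)).toList = key.toList := by
      rw [he]
    simpa using this.symm

-- the tokenizer loop of B, characterised by pvCsplit
theorem pv_tok (cs : List Char) (out : List String) (cur : List Char) :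
    pvFlush (cs.foldl pvTokStep (out, cur))
      = out ++ (((pvCsplit cs).modifyHead (cur ++ ·)).filter (· ≠ [])).map String.ofList := by
  induction cs generalizing out cur with
  | nil =>
    by_cases hcur : cur = []
    · simp [pvFlush, pvCsplit, hcur]
    · simp [pvFlush, pvCsplit, hcur]
  | cons c cs ih =>
    obtain ⟨hd, tl, hcs⟩ : ∃ hd tl, pvCsplit cs = hd :: tl := by
      cases hx : pvCsplit cs with
      | nil => exact absurd hx (pvCsplit_ne_nil cs)
      | cons a t => exact ⟨a, t, rfl⟩
    by_cases hc : c = '#'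
    · subst hc
      rw [List.foldl_cons, show pvTokStep (out, cur) '#'
            = (if cur ≠ [] then out ++ [String.ofList cur] else out, []) from rfl]
      rw [ih]
      by_cases hcur : cur = []
      · simp [pvCsplit, hcs, hcur]
      · simp [pvCsplit, hcs, hcur]
    · rw [List.foldl_cons, show pvTokStep (out, cur) c = (out, cur ++ [c]) from by
          simp [pvTokStep, hc]]
      rw [ih]
      simp [pvCsplit, hc, hcs]

-- B's inner loop starting from an empty token buffer
theorem pv_tok0 (cs : List Char) (out : List String) :
    pvFlush (cs.foldl pvTokStep (out, []))
      = out ++ ((pvCsplit cs).filter (· ≠ [])).map String.ofList := by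
  rw [pv_tok]
  obtain ⟨hd, tl, hcs⟩ : ∃ hd tl, pvCsplit cs = hd :: tl := by
    cases hx : pvCsplit cs with
    | nil => exact absurd hx (pvCsplit_ne_nil cs)
    | cons a t => exact ⟨a, t, rfl⟩
  simp [hcs]

-- fold shape of B's outer loop
theorem pv_outer_foldl (l : List String) (c : String → Bool) (g : String → List String)
    (acc : List String) :
    l.foldl (fun out x => if c x then out ++ g x else out) acc
      = acc ++ l.flatMap (fun x => if c x then g x else []) := by
  induction l generalizing acc with
  | nil => simp
  | cons x xs ih =>
    by_cases hx : c x
    · simp [hx, ih]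
    · simp [hx, ih]

theorem pv_filter_flatMap {α β : Type} (l : List α) (p : α → Bool) (g : α → List β) :
    (l.filter p).flatMap g = l.flatMap (fun x => if p x then g x else []) := by
  induction l with
  | nil => simp
  | cons x xs ih =>
    by_cases hx : p x
    · simp [hx, ih]
    · simp [hx, ih]

-- s.split('#') as pvCsplit on code points
theorem pv_split_hash (s : String) :
    (PySem.Str.split? s "#").getD [] = (pvCsplit s.toList).map String.ofList := by
  simp [PySem.Str.split?, PySem.Chars.split?, pv_splitOn_hash]

theorem pv_filter_nonempty_map (css : List (List Char)) :
    (css.map String.ofList).filter (fun x => decide (0 < PySem.Str.len x))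
      = (css.filter (· ≠ [])).map String.ofList := by
  rw [List.filter_map]
  congr 1
  apply List.filter_congr
  intro cs _
  simp [PySem.Str.len_eq, Function.comp]
  cases cs <;> simp

-- ===== VERDICT (by name: the statement is the Claim_ definition above) =====
set_option maxHeartbeats 1000000 in
theorem parse_usage_list_py_spec : Claim_equal_parse_usage_list_py := by
  intro key irs _ _
  simp only [Spec_parse_usage_list_py, parse_usage_list_py, parse_usage_list_py_alt]
  -- B side: prefix check = startswith, tokenizer loop = filtered pvCsplit, outer loop = flatMap
  rw [show (fun (out : List String) (x : String) =>
        if PySem.Str.slice x none (some (PySem.Str.len key)) == key then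
          pvFlush ((PySem.Str.slice x (some (PySem.Str.len key)) none).toList.foldl pvTokStep (out, []))
        else out)
      = (fun (out : List String) (x : String) =>
          if PySem.Str.startswith x key then
            out ++ ((pvCsplit (PySem.Str.slice x (some (PySem.Str.len key)) none).toList).filter (· ≠ [])).map String.ofList
          else out)
      from funext fun out => funext fun x => by
        rw [pv_prefix_check]
        by_cases hx : PySem.Str.startswith x key = true
        · rw [if_pos hx, if_pos hx, pv_tok0]
        · rw [if_neg hx, if_neg hx]]
  rw [pv_outer_foldl]
  -- A side: the pipeline becomes the same flatMap
  have hmap : (irs.filter (fun x => PySem.Str.startswith x key)).map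
        (fun x => pvPartitionAfter x key)
      = (irs.filter (fun x => PySem.Str.startswith x key)).map
        (fun x => PySem.Str.slice x (some (PySem.Str.len key)) none) :=
    List.map_congr_left (fun x hx => pv_after_of_startswith x key (List.mem_filter.mp hx).2)
  rw [hmap]
  rw [pv_split_hash, pv_filter_nonempty_map, PySem.Str.toList_join]
  rw [show ("#" : String).toList = ['#'] from rfl]
  rw [List.map_map, pv_flatten, List.flatMap_map, List.map_flatMap, pv_filter_flatMap]
  simp only [List.nil_append, Function.comp]

theorem parse_usage_list_py_raises : Claim_raises_parse_usage_list_py := by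
  unfold Claim_raises_parse_usage_list_py
  refine ⟨?_, by decide⟩
  intro key irs _ hr
  unfold Pre_parse_usage_list_py
  rw [not_or]
  exact ⟨by simpa using hr.1, hr.2⟩

-- self-check: the raise-witness value of B, extracted from the raises theorem
theorem pvRaiseWitness_ok :
    parse_usage_list_py_alt pvRaiseWitness_parse_usage_list_py.1 pvRaiseWitness_parse_usage_list_py.2
      = pvRaiseWitnessOut_parse_usage_list_py :=
  parse_usage_list_py_raises.2.2.2
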